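-- pv_equiv track=rewrite | github.com/fretscha/advent-of-code | 2025/6/solve.py | part2
-- ===== SOURCE A (Python) =====
-- def part2(lines: list[str]) -> int:
--     """
--     Compute part 2 solution - read the worksheet character-by-character right-to-left.
--     Each vertical column of digits forms a number (top = MSD, bottom = LSD).
--     Returns:
--         _type_: int
--     """
--     # Pad all lines to same length
--     max_len = max(len(line.rstrip("\n")) for line in lines)
--     padded_lines = [line.rstrip("\n").ljust(max_len) for line in lines]
--
--     # Separate data rows from operator row
--     data_rows = padded_lines[:-1]
--     operator_row = padded_lines[-1]
--
--     # Find operator positions (which define problems)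
--     operator_positions = []
--     for i, c in enumerate(operator_row):
--         if c in ["+", "*"]:
--             operator_positions.append(i)
--
--     # Process each problem
--     grand_total = 0
--     for op_pos in operator_positions:
--         operator = operator_row[op_pos]
--         numbers = []
--
--         # Scan rightward from operator position to collect digit columns
--         scan_pos = op_pos
--         while scan_pos < max_len:
--             # Get vertical column
--             col = [data_rows[r][scan_pos] for r in range(len(data_rows))]
--
--             # Stop if we hit another operator or problem boundary
--             if scan_pos > op_pos and operator_row[scan_pos] in ["+", "*"]:
--                 break
--
--             # Collect digits in this column (top to bottom)
--             digits = [c for c in col if c.isdigit()]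
--             if digits:
--                 # Form number from digits (top = MSD, bottom = LSD)
--                 num = int("".join(digits))
--                 numbers.append(num)
--             elif scan_pos > op_pos and all(c == " " for c in col):
--                 # Empty column marks end of this problem
--                 break
--
--             scan_pos += 1
--
--         # Compute result for this problem
--         if numbers:
--             if operator == "+":
--                 result = sum(numbers)
--             else:  # operator == "*"
--                 result = 1
--                 for n in numbers:
--                     result *= n
--             grand_total += result
--
--     return grand_total
-- ===== SOURCE B (Python) =====
-- def _finish(op, nums):
--     """Value of a finished problem: sum for '+', product for '*', 0 if nothing collected."""
--     if op is None or not nums: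
--         return 0
--     if op == "+":
--         return sum(nums)
--     result = 1
--     for n in nums:
--         result *= n
--     return result
--
--
-- def part2(lines: list[str]) -> int:
--     # Transpose once into a per-column table, then one left-to-right sweep.
--     stripped = [line.rstrip("\n") for line in lines]
--     width = max(len(s) for s in stripped)
--     rows = [s.ljust(width) for s in stripped]
--     data, op_row = rows[:-1], rows[-1]
--
--     cols = []
--     for c in range(width):
--         digits = [row[c] for row in data if row[c].isdigit()]
--         num = int("".join(digits)) if digits else None
--         blank = all(row[c] == " " for row in data)
--         cols.append((op_row[c], num, blank))
--
--     total = 0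
--     op = None          # operator of the problem in progress, or None
--     nums = []
--     for opch, num, blank in cols:
--         if opch in ("+", "*"):
--             total += _finish(op, nums)
--             op = opch
--             nums = [num] if num is not None else []
--         elif op is not None:
--             if num is not None:
--                 nums.append(num)
--             elif blank:
--                 total += _finish(op, nums)
--                 op, nums = None, []
--     return total + _finish(op, nums)
-- ===== Notes on version B (the rewrite author's own statement) =====
-- stated objective: alternative
-- what changed: B transposes the worksheet once into a per-column table (operator char, column number, blank flag) and computes all problems in a single left-to-right state-machine sweep, instead of A's re-scanning the grid rightward (rebuilding each vertical column) from every operator position.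
import Mathlib
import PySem

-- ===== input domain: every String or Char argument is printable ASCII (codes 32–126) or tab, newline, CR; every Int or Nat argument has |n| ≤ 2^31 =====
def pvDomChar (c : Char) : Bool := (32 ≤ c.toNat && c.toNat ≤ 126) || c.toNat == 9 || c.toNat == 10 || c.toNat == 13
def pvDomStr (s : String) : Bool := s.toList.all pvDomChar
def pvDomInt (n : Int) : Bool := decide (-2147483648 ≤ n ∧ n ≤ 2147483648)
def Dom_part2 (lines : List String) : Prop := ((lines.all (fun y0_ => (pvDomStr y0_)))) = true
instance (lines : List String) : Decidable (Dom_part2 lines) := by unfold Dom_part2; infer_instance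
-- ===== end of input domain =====

-- B replaces A's per-operator vertical rescans by one transposition into a per-column
-- table (operator char, column number, blank flag) followed by a single left-to-right
-- state-machine sweep; objective: alternative structure, same exact results.

-- shared hand ports (both Pythons contain these identical expressions):
-- line.rstrip("\n") : drop trailing newline chars (exact for rstrip with a single-char set)
def rstripNL (cs : List Char) : List Char := (cs.reverse.dropWhile (· == '\n')).reverse
-- s.ljust(n) with spaces (exact: pads only when shorter)
def ljustSp (cs : List Char) (n : Nat) : List Char := cs ++ List.replicate (n - cs.length) ' '
-- c in ["+", "*"]
def isOpChar (c : Char) : Bool := c == '+' || c == '*'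

-- ===== PORT A =====
-- the vertical column A rebuilds at every scan position: [data_rows[r][q] for r in range(len(data_rows))]
def colA (data : List (List Char)) (q : Int) : List Char :=
  (PySem.List.pyRange 0 data.length 1).map
    (fun r => PySem.List.pyGetD (PySem.List.pyGetD data r []) q ' ')

-- the while-loop of A: fuel = number of remaining positions (max_len - scan_pos)
def scanA (data : List (List Char)) (opRow : List Char) (opPos : Int) :
    Nat → Int → List Int → List Int
  | 0, _, nums => nums
  | fuel+1, q, nums =>
      let col := colA data q
      if decide (opPos < q) && isOpChar (PySem.List.pyGetD opRow q ' ') then nums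
      else
        let digits := col.filter PySem.Chars.isdigit
        if digits = [] then
          if decide (opPos < q) && col.all (· == ' ') then nums
          else scanA data opRow opPos fuel (q+1) nums
        else scanA data opRow opPos fuel (q+1) (nums ++ [(PySem.Int.ofChars? digits).getD 0])

def part2 (lines : List String) : Int :=
  let ls := lines.map (fun s => rstripNL s.toList)
  -- max(...) raises ValueError on empty `lines`; excluded by Pre_part2
  let maxLen := (PySem.List.max? (ls.map List.length) (fun x => x)).getD 0
  let padded := ls.map (fun cs => ljustSp cs maxLen)
  let dataRows := PySem.List.slice padded none (some (-1))
  let opRow := PySem.List.pyGetD padded (-1) []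
  let positions := (PySem.List.enumerate opRow 0).foldl
    (fun acc ic => if isOpChar ic.2 then acc ++ [ic.1] else acc) []
  positions.foldl (fun acc p =>
    let operator := PySem.List.pyGetD opRow p ' '
    let nums := scanA dataRows opRow p ((maxLen : Int) - p).toNat p []
    if nums = [] then acc
    else acc + (if operator == '+' then nums.foldl (· + ·) 0 else nums.foldl (· * ·) 1)) 0

-- ===== PORT B =====
def finishB (op : Option Char) (nums : List Int) : Int :=
  match op with
  | none => 0
  | some o =>
    if nums = [] then 0
    else if o == '+' then nums.foldl (· + ·) 0 else nums.foldl (· * ·) 1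

-- one entry of the per-column table: (operator-row char, column number, blank flag)
def colB (data : List (List Char)) (opRow : List Char) (q : Int) : Char × Option Int × Bool :=
  let digits := (data.map (fun row => PySem.List.pyGetD row q ' ')).filter PySem.Chars.isdigit
  let num := if digits = [] then none else some ((PySem.Int.ofChars? digits).getD 0)
  let blank := data.all (fun row => PySem.List.pyGetD row q ' ' == ' ')
  (PySem.List.pyGetD opRow q ' ', num, blank)

-- one step of the left-to-right sweep over the column table
def stepB (st : Int × Option Char × List Int) (col : Char × Option Int × Bool) :
    Int × Option Char × List Int :=
  let (total, op, nums) := st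
  let (opch, num, blank) := col
  if isOpChar opch then
    (total + finishB op nums, some opch, match num with | some v => [v] | none => [])
  else
    match op with
    | none => st
    | some _ =>
      match num with
      | some v => (total, op, nums ++ [v])
      | none => if blank then (total + finishB op nums, none, []) else st

def part2_alt (lines : List String) : Int :=
  let ls := lines.map (fun s => rstripNL s.toList)
  let width := (PySem.List.max? (ls.map List.length) (fun x => x)).getD 0
  let rows := ls.map (fun cs => ljustSp cs width)
  let dataRows := PySem.List.slice rows none (some (-1))
  let opRow := PySem.List.pyGetD rows (-1) []
  let cols := (PySem.List.pyRange 0 width 1).foldl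
    (fun acc c => acc ++ [colB dataRows opRow c]) []
  let st := cols.foldl stepB (0, none, [])
  st.1 + finishB st.2.1 st.2.2

-- ===== PRECONDITION & SPEC =====
-- Pre_ excludes only the empty list, on which A raises ValueError (max() of an empty sequence).
def Pre_part2 (lines : List String) : Prop := lines ≠ []
instance (lines : List String) : Decidable (Pre_part2 lines) := by unfold Pre_part2; infer_instance
def pvWitness_part2 : List String := ["1 24", "3  5", "+ * "]

def Spec_part2 (lines : List String) (out : Int) : Prop := out = part2_alt lines
instance (lines : List String) (out : Int) : Decidable (Spec_part2 lines out) := by unfold Spec_part2; infer_instance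

-- ===== CLAIM (what is proved, stated in full; the proofs are below) =====
def Claim_equal_part2 : Prop := ∀ (lines : List String), Dom_part2 lines → Pre_part2 lines → Spec_part2 lines (part2 lines)


-- ===== LEMMAS AND PROOFS =====

-- value of a finished problem, as used on both sides
def resOp (o : Char) (ns : List Int) : Int := finishB (some o) ns

-- numbers a problem collects from the columns after its operator column
def runCols : List (Char × Option Int × Bool) → List Int
  | [] => []
  | c :: ts =>
    if isOpChar c.1 then []
    else
      match c.2.1 with
      | some v => v :: runCols ts
      | none => if c.2.2 then [] else runCols ts

-- grand total contributed by a suffix of the column table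
def sumCols : List (Char × Option Int × Bool) → Int
  | [] => 0
  | c :: ts => (if isOpChar c.1 then resOp c.1 (c.2.1.toList ++ runCols ts) else 0) + sumCols ts

-- eventual value of the problem in progress
def pend : Option Char → List Int → List (Char × Option Int × Bool) → Int
  | none, _, _ => 0
  | some o, nums, ts => resOp o (nums ++ runCols ts)

-- the column table from column j (exclusive bound W)
def tblFrom (data : List (List Char)) (opRow : List Char) (W : Nat) (j : Nat) :
    List (Char × Option Int × Bool) :=
  (PySem.List.pyRange (j : Int) (W : Int) 1).map (colB data opRow)

lemma tblFrom_nil (data : List (List Char)) (opRow : List Char) (W j : Nat) (h : W ≤ j) :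
    tblFrom data opRow W j = [] := by
  unfold tblFrom
  rw [PySem.List.pyRange_one_eq_nil (by exact_mod_cast h)]
  rfl

lemma tblFrom_cons (data : List (List Char)) (opRow : List Char) (W j : Nat) (h : j < W) :
    tblFrom data opRow W j = colB data opRow (j : Int) :: tblFrom data opRow W (j+1) := by
  unfold tblFrom
  rw [PySem.List.pyRange_one_cons (by exact_mod_cast h)]
  simp [List.map_cons]

lemma colA_eq (data : List (List Char)) (q : Int) :
    colA data q = data.map (fun row => PySem.List.pyGetD row q ' ') := by
  unfold colA
  have h : (PySem.List.pyRange 0 (data.length : Int) 1).map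
      (fun r => PySem.List.pyGetD (PySem.List.pyGetD data r []) q ' ')
      = ((PySem.List.pyRange 0 (data.length : Int) 1).map
          (fun r => PySem.List.pyGetD data r [])).map
        (fun row => PySem.List.pyGetD row q ' ') := by
    rw [List.map_map]; rfl
  rw [h, PySem.List.map_pyGetD_pyRange_zero']

lemma res_if (o : Char) (ns : List Int) (acc : Int) :
    (if ns = [] then acc
     else acc + (if o == '+' then ns.foldl (· + ·) 0 else ns.foldl (· * ·) 1))
    = acc + resOp o ns := by
  by_cases h : ns = [] <;> simp [resOp, finishB, h]

lemma foldB_eq (ts : List (Char × Option Int × Bool)) :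
    ∀ (total : Int) (op : Option Char) (nums : List Int),
    (ts.foldl stepB (total, op, nums)).1
      + finishB (ts.foldl stepB (total, op, nums)).2.1 (ts.foldl stepB (total, op, nums)).2.2
    = total + pend op nums ts + sumCols ts := by
  induction ts with
  | nil =>
    intro total op nums
    cases op <;> simp [pend, resOp, sumCols, finishB, runCols]
  | cons c ts ih =>
    intro total op nums
    obtain ⟨o', n, b⟩ := c
    by_cases hop : isOpChar o' = true
    · have hstep : stepB (total, op, nums) (o', n, b)
          = (total + finishB op nums, some o', n.toList) := by
        cases n <;> simp [stepB, hop]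
      have hpend : pend op nums ((o', n, b) :: ts) = finishB op nums := by
        cases op <;> simp [pend, runCols, resOp, hop, finishB]
      simp only [List.foldl_cons, hstep, ih, hpend, sumCols, hop, if_pos]
      simp only [pend, resOp]
      ring
    · cases op with
      | none =>
        have hstep : stepB (total, none, nums) (o', n, b) = (total, none, nums) := by
          simp [stepB, hop]
        simp [List.foldl_cons, hstep, ih, pend, sumCols, hop]
      | some o =>
        cases n with
        | some v =>
          have hstep : stepB (total, some o, nums) (o', some v, b)
              = (total, some o, nums ++ [v]) := by
            simp [stepB, hop]
          simp [List.foldl_cons, hstep, ih, pend, sumCols, runCols, hop,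
            List.append_assoc]
        | none =>
          cases b with
          | true =>
            have hstep : stepB (total, some o, nums) (o', none, true)
                = (total + finishB (some o) nums, none, []) := by
              simp [stepB, hop]
            simp only [List.foldl_cons, hstep, ih]
            simp [pend, sumCols, runCols, resOp, hop]
          | false =>
            have hstep : stepB (total, some o, nums) (o', none, false)
                = (total, some o, nums) := by
              simp [stepB, hop]
            simp only [List.foldl_cons, hstep, ih]
            simp [pend, sumCols, runCols, resOp, hop]

lemma scan_run (data : List (List Char)) (opRow : List Char) (W : Nat) (opPos : Int) :
    ∀ (fuel : Nat) (j : Nat), opPos < (j : Int) → fuel = W - j → j ≤ W → ∀ (nums : List Int),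
    scanA data opRow opPos fuel (j : Int) nums = nums ++ runCols (tblFrom data opRow W j) := by
  intro fuel
  induction fuel with
  | zero =>
    intro j hlt hf hle nums
    have hj : j = W := by omega
    subst hj
    rw [tblFrom_nil _ _ _ _ le_rfl]
    simp [scanA, runCols]
  | succ fuel ih =>
    intro j hlt hf hle nums
    have hjW : j < W := by omega
    have hcast : (j : Int) + 1 = ((j + 1 : Nat) : Int) := by push_cast; ring
    rw [tblFrom_cons _ _ _ _ hjW]
    by_cases hcase : isOpChar (opRow[j]?.getD ' ') = true
    · have h1 : scanA data opRow opPos (fuel+1) (j : Int) nums = nums := by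
        simp [scanA, hcase, hlt]
      rw [h1]
      simp [runCols, colB, hcase]
    · by_cases hd : (data.map (fun row => row[j]?.getD ' ')).filter PySem.Chars.isdigit = []
      · by_cases hbl : (data.map (fun row => row[j]?.getD ' ')).all (· == ' ') = true
        · have h1 : scanA data opRow opPos (fuel+1) (j : Int) nums = nums := by
            simp [scanA, colA_eq, hcase, hd, hbl, hlt]
          rw [h1]
          have hbl' : ∀ x ∈ data, x[j]?.getD ' ' = ' ' := by simpa using hbl
          simp [runCols, colB, hcase, hd]
          intro x hx hne
          exact absurd (hbl' x hx) hne
        · have h1 : scanA data opRow opPos (fuel+1) (j : Int) nums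
              = scanA data opRow opPos fuel ((j : Int) + 1) nums := by
            simp [scanA, colA_eq, hcase, hd, hbl, hlt]
          rw [h1, hcast, ih (j+1) (by push_cast; omega) (by omega) (by omega)]
          have hbl' : ¬ ∀ x ∈ data, x[j]?.getD ' ' = ' ' := by simpa using hbl
          simp [runCols, colB, hcase, hd, hbl']
      · have h1 : scanA data opRow opPos (fuel+1) (j : Int) nums
            = scanA data opRow opPos fuel ((j : Int) + 1)
                (nums ++ [(PySem.Int.ofChars? ((data.map (fun row => row[j]?.getD ' ')).filter
                  PySem.Chars.isdigit)).getD 0]) := by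
          simp [scanA, colA_eq, hcase, hd, hlt]
        rw [h1, hcast, ih (j+1) (by push_cast; omega) (by omega) (by omega)]
        simp [runCols, colB, hcase, hd]

lemma scan_start (data : List (List Char)) (opRow : List Char) (W : Nat) (p : Nat) (hp : p < W) :
    scanA data opRow (p : Int) (W - p) (p : Int) []
    = (colB data opRow (p : Int)).2.1.toList ++ runCols (tblFrom data opRow W (p+1)) := by
  obtain ⟨fuel, hfuel⟩ : ∃ fuel, W - p = fuel + 1 := ⟨W - p - 1, by omega⟩
  rw [hfuel]
  have hcast : (p : Int) + 1 = ((p + 1 : Nat) : Int) := by push_cast; ring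
  by_cases hd : (data.map (fun row => row[p]?.getD ' ')).filter PySem.Chars.isdigit = []
  · have h1 : scanA data opRow (p : Int) (fuel+1) (p : Int) []
        = scanA data opRow (p : Int) fuel ((p : Int) + 1) [] := by
      simp [scanA, colA_eq, hd]
    rw [h1, hcast, scan_run data opRow W (p : Int) fuel (p+1) (by push_cast; omega)
      (by omega) (by omega)]
    simp [colB, hd]
  · have h1 : scanA data opRow (p : Int) (fuel+1) (p : Int) []
        = scanA data opRow (p : Int) fuel ((p : Int) + 1)
            ([] ++ [(PySem.Int.ofChars? ((data.map (fun row => row[p]?.getD ' ')).filter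
              PySem.Chars.isdigit)).getD 0]) := by
      simp [scanA, colA_eq, hd]
    rw [h1, hcast, scan_run data opRow W (p : Int) fuel (p+1) (by push_cast; omega)
      (by omega) (by omega)]
    simp [colB, hd]

lemma outer_fold (data : List (List Char)) (opRow : List Char) (W : Nat) :
    ∀ (d j : Nat), d = W - j → j ≤ W → ∀ (acc : Int),
    ((PySem.List.pyRange (j : Int) (W : Int) 1).filter
        (fun i => isOpChar (PySem.List.pyGetD opRow i ' '))).foldl
      (fun acc p =>
        if scanA data opRow p ((W : Int) - p).toNat p [] = [] then acc
        else acc + (if PySem.List.pyGetD opRow p ' ' == '+'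
          then (scanA data opRow p ((W : Int) - p).toNat p []).foldl (· + ·) 0
          else (scanA data opRow p ((W : Int) - p).toNat p []).foldl (· * ·) 1)) acc
    = acc + sumCols (tblFrom data opRow W j) := by
  intro d
  induction d with
  | zero =>
    intro j hd hle acc
    have hj : j = W := by omega
    subst hj
    rw [PySem.List.pyRange_one_eq_nil (by omega), tblFrom_nil _ _ _ _ le_rfl]
    simp [sumCols]
  | succ d ih =>
    intro j hd hle acc
    have hjW : j < W := by omega
    rw [PySem.List.pyRange_one_cons (by exact_mod_cast hjW), tblFrom_cons _ _ _ _ hjW]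
    have hcast : (j : Int) + 1 = ((j + 1 : Nat) : Int) := by push_cast; ring
    have hfuel : (((W : Nat) : Int) - (j : Int)).toNat = W - j := by omega
    by_cases hcase : isOpChar (opRow[j]?.getD ' ') = true
    · rw [List.filter_cons_of_pos (by simpa using hcase), List.foldl_cons]
      have hbody : (if scanA data opRow (j : Int) (((W : Nat) : Int) - (j : Int)).toNat (j : Int) [] = []
            then acc
            else acc + (if PySem.List.pyGetD opRow (j : Int) ' ' == '+'
              then (scanA data opRow (j : Int) (((W : Nat) : Int) - (j : Int)).toNat (j : Int) []).foldl (· + ·) 0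
              else (scanA data opRow (j : Int) (((W : Nat) : Int) - (j : Int)).toNat (j : Int) []).foldl (· * ·) 1))
          = acc + resOp (opRow[j]?.getD ' ')
              ((colB data opRow (j : Int)).2.1.toList ++ runCols (tblFrom data opRow W (j+1))) := by
        rw [hfuel, scan_start data opRow W j hjW]
        rw [res_if]
        simp
      rw [hbody, hcast, ih (j+1) (by omega) (by omega)]
      simp [sumCols, colB, hcase]
      ring
    · rw [List.filter_cons_of_neg (by simpa using hcase)]
      rw [hcast, ih (j+1) (by omega) (by omega)]
      simp [sumCols, colB, hcase]


lemma foldl_if_append (l : List Int) (pred : Int → Bool) :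
    ∀ acc, l.foldl (fun acc i => if pred i then acc ++ [i] else acc) acc = acc ++ l.filter pred := by
  induction l with
  | nil => simp
  | cons x t ih => intro acc; by_cases h : pred x <;> simp [h, ih]

-- ===== VERDICT (by name: the statement is the Claim_ definition above) =====
theorem part2_spec : Claim_equal_part2 := by
  intro lines hdom hpre
  unfold Spec_part2
  unfold part2 part2_alt
  simp only []
  set ls := lines.map (fun s => rstripNL s.toList) with hls_def
  have hls : ls ≠ [] := by
    intro h
    exact hpre (List.map_eq_nil_iff.mp h)
  set W := (PySem.List.max? (ls.map List.length) (fun x => x)).getD 0 with hW_def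
  set padded := ls.map (fun cs => ljustSp cs W) with hpad_def
  have hpadne : padded ≠ [] := by
    intro h
    exact hls (List.map_eq_nil_iff.mp h)
  set dataRows := PySem.List.slice padded none (some (-1)) with hdata_def
  set opRow := PySem.List.pyGetD padded (-1) [] with hop_def
  -- every stripped line is at most W long
  have hcs_le : ∀ cs ∈ ls, cs.length ≤ W := by
    intro cs hcs
    have hne : (ls.map List.length) ≠ [] := by simpa using hls
    obtain ⟨m, hm⟩ : ∃ m, PySem.List.max? (ls.map List.length) (fun x => x) = some m := by
      cases h : PySem.List.max? (ls.map List.length) (fun x => x) with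
      | none => exact absurd ((PySem.List.max?_eq_none_iff _ _).mp h) hne
      | some m => exact ⟨m, rfl⟩
    have hle := PySem.List.max?_isMax hm cs.length (List.mem_map_of_mem hcs)
    rw [hW_def, hm]
    simpa using hle
  -- the operator row is a padded line, hence has length W
  have hopmem : opRow ∈ padded := by
    rw [hop_def, PySem.List.pyGetD_neg_one padded [] hpadne]
    exact List.getLast_mem hpadne
  have hoplen : opRow.length = W := by
    obtain ⟨cs, hcs, hrow⟩ := List.mem_map.mp hopmem
    have := hcs_le cs hcs
    simp [← hrow, ljustSp]
    omega
  -- A's operator positions are the op columns of [0, W)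
  have hpos : (PySem.List.enumerate opRow 0).foldl
      (fun acc ic => if isOpChar ic.2 then acc ++ [ic.1] else acc) []
      = (PySem.List.pyRange 0 (W : Int) 1).filter
          (fun i => isOpChar (PySem.List.pyGetD opRow i ' ')) := by
    rw [PySem.List.enumerate_eq_map_pyRange opRow ' ', List.foldl_map]
    have hlen : PySem.List.len opRow = (W : Int) := by simp [hoplen]
    rw [hlen, foldl_if_append]
    simp
  rw [hpos]
  -- A's grand total is the table total
  have hA := outer_fold dataRows opRow W (W - 0) 0 rfl (by omega) 0
  simp only [Nat.cast_zero] at hA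
  rw [hA]
  -- B's sweep is the table total
  rw [PySem.List.foldl_append_singleton_eq_map (colB dataRows opRow)]
  have hB := foldB_eq ((PySem.List.pyRange 0 (W : Int) 1).map (colB dataRows opRow)) 0 none []
  have htbl : tblFrom dataRows opRow W 0
      = (PySem.List.pyRange 0 (W : Int) 1).map (colB dataRows opRow) := by
    simp [tblFrom]
  rw [← htbl] at hB
  rw [← htbl]
  simp only [List.nil_append]
  rw [hB]
  simp [pend]
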